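-- pv_equiv track=rewrite | github.com/ohshitgorillas/autocorrect_generator_espanso | entroppy/resolution/typo_index.py | _process_typo_chunk_for_index
-- ===== SOURCE A (Python) =====
-- def _process_typo_chunk_for_index(
--     chunk_data: tuple[list[str], list[str]],
-- ) -> dict[str, dict[str, bool]]:
--     """Worker function to process a chunk of typos for substring index building.
--
--     Args:
--         chunk_data: Tuple of (chunk_typos, all_typos_list)
--             - chunk_typos: List of typos to process in this chunk
--             - all_typos_list: Full list of all typos (for checking against)
--
--     Returns:
--         Dictionary mapping each typo in chunk to its substring relationship flags
--     """
--     chunk_typos, all_typos_list = chunk_data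
--     chunk_index: dict[str, dict[str, bool]] = {}
--
--     for typo in chunk_typos:
--         chunk_index[typo] = {
--             "appears_as_prefix": False,
--             "appears_as_suffix": False,
--             "appears_in_middle": False,
--         }
--
--         for other_typo in all_typos_list:
--             if other_typo == typo:
--                 continue
--             if typo in other_typo:
--                 if other_typo.startswith(typo):
--                     chunk_index[typo]["appears_as_prefix"] = True
--                 elif other_typo.endswith(typo):
--                     chunk_index[typo]["appears_as_suffix"] = True
--                 else:
--                     chunk_index[typo]["appears_in_middle"] = True
--
--     return chunk_index
-- ===== SOURCE B (Python) =====
-- def _process_typo_chunk_for_index(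
--     chunk_data: tuple[list[str], list[str]],
-- ) -> dict[str, dict[str, bool]]:
--     """Index-based re-implementation: precompute, in one pass over the corpus,
--     the sets of strings that occur as a strict prefix, as a (non-prefix) strict
--     suffix, and as an interior substring of some corpus string; then answer each
--     chunk typo by three set-membership tests."""
--     chunk_typos, all_typos_list = chunk_data
--     prefixes: set[str] = set()
--     suffixes: set[str] = set()
--     middles: set[str] = set()
--     for other in all_typos_list:
--         n = len(other)
--         prefixes.update(other[:k] for k in range(n))
--         suffixes.update(
--             s for s in (other[k:] for k in range(1, n))
--             if not other.startswith(s)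
--         )
--         middles.update(
--             s for s in (other[i:j] for i in range(1, n) for j in range(i + 1, n))
--             if not other.startswith(s) and not other.endswith(s)
--         )
--     return {
--         typo: {
--             "appears_as_prefix": typo in prefixes,
--             "appears_as_suffix": typo in suffixes,
--             "appears_in_middle": typo in middles,
--         }
--         for typo in chunk_typos
--     }
-- ===== Notes on version B (the rewrite author's own statement) =====
-- stated objective: faster
-- what changed: Replaces A's nested chunk-by-corpus scan (substring/startswith/endswith test for every (typo, other) pair) with three substring sets (strict prefixes, non-prefix strict suffixes, interior substrings) precomputed in one pass over the corpus, each chunk typo then answered by three hash-set membership tests.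
import Mathlib
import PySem

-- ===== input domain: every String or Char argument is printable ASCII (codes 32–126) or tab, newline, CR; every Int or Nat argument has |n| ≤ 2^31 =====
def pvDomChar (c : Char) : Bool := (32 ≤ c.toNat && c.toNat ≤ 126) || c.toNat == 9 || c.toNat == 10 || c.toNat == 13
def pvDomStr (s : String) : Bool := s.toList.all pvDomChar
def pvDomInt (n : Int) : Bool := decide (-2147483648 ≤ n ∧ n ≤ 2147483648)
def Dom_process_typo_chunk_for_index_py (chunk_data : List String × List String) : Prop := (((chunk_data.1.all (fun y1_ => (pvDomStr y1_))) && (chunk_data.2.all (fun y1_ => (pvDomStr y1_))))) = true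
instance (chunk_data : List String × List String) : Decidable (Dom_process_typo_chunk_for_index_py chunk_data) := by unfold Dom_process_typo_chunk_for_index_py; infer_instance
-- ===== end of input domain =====

-- B replaces A's chunk×corpus nested scan by three substring sets precomputed in one pass
-- over the corpus, answering each chunk typo by set membership (objective: faster).

-- ===== PORT A =====
-- the body of A's inner loop over all_typos_list (mutating the flags dict of the current typo)
def pvInnerA (typo : String) (flags : PySem.Dict String Bool) (other_typo : String) : PySem.Dict String Bool :=
  if other_typo == typo then flags
  else if PySem.Str.isIn typo other_typo then
    if PySem.Str.startswith other_typo typo then flags.insert "appears_as_prefix" true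
    else if PySem.Str.endswith other_typo typo then flags.insert "appears_as_suffix" true
    else flags.insert "appears_in_middle" true
  else flags

def process_typo_chunk_for_index_py (chunk_data : List String × List String) : List (String × List (String × Bool)) :=
  let chunk_typos := chunk_data.1
  let all_typos_list := chunk_data.2
  let chunk_index : PySem.Dict String (PySem.Dict String Bool) :=
    chunk_typos.foldl
      (fun d typo =>
        d.insert typo
          (all_typos_list.foldl (pvInnerA typo)
            (PySem.Dict.ofList
              [("appears_as_prefix", false), ("appears_as_suffix", false), ("appears_in_middle", false)])))
      PySem.Dict.empty
  chunk_index.items.map (fun p => (p.1, p.2.items))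

-- ===== PORT B =====
-- the strict prefixes other[:k], k in range(len(other))
def pvCandPre (other : String) : List String :=
  (PySem.List.pyRange 0 (PySem.Str.len other) 1).map (fun k => PySem.Str.slice other none (some k))

-- the strict suffixes other[k:], k in range(1, len(other)), that are not also a prefix of other
def pvCandSuf (other : String) : List String :=
  ((PySem.List.pyRange 1 (PySem.Str.len other) 1).map (fun k => PySem.Str.slice other (some k) none)).filter
    (fun s => ! PySem.Str.startswith other s)

-- the interior substrings other[i:j], 1 <= i < j < len(other), that are neither a prefix nor a suffix of other
def pvCandMid (other : String) : List String :=
  ((PySem.List.pyRange 1 (PySem.Str.len other) 1).flatMap (fun i =>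
    (PySem.List.pyRange (i + 1) (PySem.Str.len other) 1).map (fun j =>
      PySem.Str.slice other (some i) (some j)))).filter
    (fun s => ! PySem.Str.startswith other s && ! PySem.Str.endswith other s)

def process_typo_chunk_for_index_py_alt (chunk_data : List String × List String) : List (String × List (String × Bool)) :=
  let chunk_typos := chunk_data.1
  let all_typos_list := chunk_data.2
  let prefixes : PySem.Set String :=
    all_typos_list.foldl (fun acc other => PySem.Set.update acc (pvCandPre other)) PySem.Set.empty
  let suffixes : PySem.Set String :=
    all_typos_list.foldl (fun acc other => PySem.Set.update acc (pvCandSuf other)) PySem.Set.empty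
  let middles : PySem.Set String :=
    all_typos_list.foldl (fun acc other => PySem.Set.update acc (pvCandMid other)) PySem.Set.empty
  let result : PySem.Dict String (PySem.Dict String Bool) :=
    chunk_typos.foldl
      (fun d typo =>
        d.insert typo
          (PySem.Dict.ofList
            [("appears_as_prefix", prefixes.contains typo),
             ("appears_as_suffix", suffixes.contains typo),
             ("appears_in_middle", middles.contains typo)]))
      PySem.Dict.empty
  result.items.map (fun p => (p.1, p.2.items))

-- ===== PRECONDITION & SPEC =====
def Spec_process_typo_chunk_for_index_py (chunk_data : List String × List String) (out : List (String × List (String × Bool))) : Prop := out = process_typo_chunk_for_index_py_alt chunk_data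
instance (chunk_data : List String × List String) (out : List (String × List (String × Bool))) : Decidable (Spec_process_typo_chunk_for_index_py chunk_data out) := by unfold Spec_process_typo_chunk_for_index_py; infer_instance

-- ===== CLAIM (what is proved, stated in full; the proofs are below) =====
def Claim_equal_process_typo_chunk_for_index_py : Prop := ∀ (chunk_data : List String × List String), Dom_process_typo_chunk_for_index_py chunk_data → Spec_process_typo_chunk_for_index_py chunk_data (process_typo_chunk_for_index_py chunk_data)

-- ===== LEMMAS AND PROOFS =====

-- A's per-pair classification conditions, read off pvInnerA's branch structure
def pvCondPre (typo other : String) : Bool :=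
  !(other == typo) && PySem.Str.isIn typo other && PySem.Str.startswith other typo
def pvCondSuf (typo other : String) : Bool :=
  !(other == typo) && PySem.Str.isIn typo other && !PySem.Str.startswith other typo && PySem.Str.endswith other typo
def pvCondMid (typo other : String) : Bool :=
  !(other == typo) && PySem.Str.isIn typo other && !PySem.Str.startswith other typo && !PySem.Str.endswith other typo

-- A's inner loop computes the three "any"s
lemma pvInnerA_foldl (typo : String) (all : List String) (p s m : Bool) :
    all.foldl (pvInnerA typo) (PySem.Dict.mk [("appears_as_prefix", p), ("appears_as_suffix", s), ("appears_in_middle", m)])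
      = PySem.Dict.mk [("appears_as_prefix", p || all.any (pvCondPre typo)),
                       ("appears_as_suffix", s || all.any (pvCondSuf typo)),
                       ("appears_in_middle", m || all.any (pvCondMid typo))] := by
  induction all generalizing p s m with
  | nil => simp
  | cons o rest ih =>
    simp only [List.foldl_cons, List.any_cons]
    by_cases h1 : (o == typo) = true
    · have h1c : o = typo := by simpa using h1
      have hstep : pvInnerA typo (PySem.Dict.mk [("appears_as_prefix", p), ("appears_as_suffix", s), ("appears_in_middle", m)]) o
          = PySem.Dict.mk [("appears_as_prefix", p), ("appears_as_suffix", s), ("appears_in_middle", m)] := by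
        unfold pvInnerA; rw [if_pos h1]
      rw [hstep, ih]
      simp [pvCondPre, pvCondSuf, pvCondMid, h1c]
    · have h1c : ¬ o = typo := by simpa using h1
      by_cases h2 : PySem.Str.isIn typo o = true
      · have h2c : PySem.Chars.isIn typo.toList o.toList = true := by simpa using h2
        by_cases h3 : PySem.Str.startswith o typo = true
        · have h3c : PySem.Chars.startswith o.toList typo.toList = true := by simpa using h3
          have hstep : pvInnerA typo (PySem.Dict.mk [("appears_as_prefix", p), ("appears_as_suffix", s), ("appears_in_middle", m)]) o
              = PySem.Dict.mk [("appears_as_prefix", true), ("appears_as_suffix", s), ("appears_in_middle", m)] := by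
            unfold pvInnerA; rw [if_neg h1, if_pos h2, if_pos h3]; rfl
          rw [hstep, ih]
          simp [pvCondPre, pvCondSuf, pvCondMid, h1c, h2c, h3c]
        · have h3c : PySem.Chars.startswith o.toList typo.toList = false := by simpa using h3
          by_cases h4 : PySem.Str.endswith o typo = true
          · have h4c : PySem.Chars.endswith o.toList typo.toList = true := by simpa using h4
            have hstep : pvInnerA typo (PySem.Dict.mk [("appears_as_prefix", p), ("appears_as_suffix", s), ("appears_in_middle", m)]) o
                = PySem.Dict.mk [("appears_as_prefix", p), ("appears_as_suffix", true), ("appears_in_middle", m)] := by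
              unfold pvInnerA; rw [if_neg h1, if_pos h2, if_neg h3, if_pos h4]; rfl
            rw [hstep, ih]
            simp [pvCondPre, pvCondSuf, pvCondMid, h1c, h2c, h3c, h4c]
          · have h4c : PySem.Chars.endswith o.toList typo.toList = false := by simpa using h4
            have hstep : pvInnerA typo (PySem.Dict.mk [("appears_as_prefix", p), ("appears_as_suffix", s), ("appears_in_middle", m)]) o
                = PySem.Dict.mk [("appears_as_prefix", p), ("appears_as_suffix", s), ("appears_in_middle", true)] := by
              unfold pvInnerA; rw [if_neg h1, if_pos h2, if_neg h3, if_neg h4]; rfl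
            rw [hstep, ih]
            simp [pvCondPre, pvCondSuf, pvCondMid, h1c, h2c, h3c, h4c]
      · have h2c : PySem.Chars.isIn typo.toList o.toList = false := by simpa using h2
        have hstep : pvInnerA typo (PySem.Dict.mk [("appears_as_prefix", p), ("appears_as_suffix", s), ("appears_in_middle", m)]) o
            = PySem.Dict.mk [("appears_as_prefix", p), ("appears_as_suffix", s), ("appears_in_middle", m)] := by
          unfold pvInnerA; rw [if_neg h1, if_neg h2]
        rw [hstep, ih]
        simp [pvCondPre, pvCondSuf, pvCondMid, h2c]

-- membership in a set accumulated with update over a list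
lemma pvMem_foldl_update (all : List String) (f : String → List String) (s : PySem.Set String) (t : String) :
    t ∈ all.foldl (fun acc o => PySem.Set.update acc (f o)) s ↔ t ∈ s ∨ ∃ o ∈ all, t ∈ f o := by
  induction all generalizing s with
  | nil => simp
  | cons o rest ih =>
    simp only [List.foldl_cons, ih, PySem.Set.mem_update]
    constructor
    · rintro ((h | h) | ⟨o', ho', h⟩)
      · exact Or.inl h
      · exact Or.inr ⟨o, by simp, h⟩
      · exact Or.inr ⟨o', by simp [ho'], h⟩
    · rintro (h | ⟨o', ho', h⟩)
      · exact Or.inl (Or.inl h)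
      · rcases List.mem_cons.mp ho' with rfl | ho'
        · exact Or.inl (Or.inr h)
        · exact Or.inr ⟨o', ho', h⟩

-- per-corpus-string characterisations ------------------------------------------------

lemma pvCondPre_iff (t o : String) :
    pvCondPre t o = true ↔ (o ≠ t ∧ t.toList <+: o.toList) := by
  unfold pvCondPre
  simp only [Bool.and_eq_true, Bool.not_eq_true', beq_eq_false_iff_ne, ne_eq,
    PySem.Str.isIn_iff_infix, PySem.Str.startswith_eq, PySem.Chars.startswith_iff]
  constructor
  · rintro ⟨⟨h1, _⟩, h3⟩; exact ⟨h1, h3⟩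
  · rintro ⟨h1, h3⟩; exact ⟨⟨by simp [h1], h3.isInfix⟩, h3⟩

lemma pvCondSuf_iff (t o : String) :
    pvCondSuf t o = true ↔ (t.toList <:+ o.toList ∧ ¬ t.toList <+: o.toList) := by
  unfold pvCondSuf
  simp only [Bool.and_eq_true, Bool.not_eq_true', ne_eq,
    PySem.Str.isIn_iff_infix, PySem.Str.startswith_eq, PySem.Str.endswith_eq,
    Bool.eq_false_iff, PySem.Chars.startswith_iff, PySem.Chars.endswith_iff]
  constructor
  · rintro ⟨⟨⟨_, _⟩, h3⟩, h4⟩; exact ⟨h4, h3⟩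
  · rintro ⟨h4, h3⟩
    have hne : ¬ o = t := by rintro rfl; exact h3 List.prefix_rfl
    exact ⟨⟨⟨by simp [hne], h4.isInfix⟩, h3⟩, h4⟩

lemma pvCondMid_iff (t o : String) :
    pvCondMid t o = true ↔ (t.toList <:+: o.toList ∧ ¬ t.toList <+: o.toList ∧ ¬ t.toList <:+ o.toList) := by
  unfold pvCondMid
  simp only [Bool.and_eq_true, Bool.not_eq_true', ne_eq,
    PySem.Str.isIn_iff_infix, PySem.Str.startswith_eq, PySem.Str.endswith_eq,
    Bool.eq_false_iff, PySem.Chars.startswith_iff, PySem.Chars.endswith_iff]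
  constructor
  · rintro ⟨⟨⟨_, h2⟩, h3⟩, h4⟩; exact ⟨h2, h3, h4⟩
  · rintro ⟨h2, h3, h4⟩
    have hne : ¬ o = t := by rintro rfl; exact h3 List.prefix_rfl
    exact ⟨⟨⟨by simp [hne], h2⟩, h3⟩, h4⟩

lemma pvMem_candPre_iff (t o : String) :
    t ∈ pvCandPre o ↔ (o ≠ t ∧ t.toList <+: o.toList) := by
  unfold pvCandPre
  simp only [List.mem_map, PySem.List.mem_pyRange_one, PySem.Str.len_eq]
  constructor
  · rintro ⟨k, ⟨hk0, hkn⟩, rfl⟩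
    have hslice : (PySem.Str.slice o none (some k)).toList = o.toList.take k.toNat := by
      rw [PySem.Str.toList_slice, PySem.Chars.slice_eq_listSlice, PySem.List.slice_to _ hk0]
    constructor
    · intro he
      have hlen := congrArg (fun s : String => s.toList.length) he
      simp only [hslice, List.length_take] at hlen
      omega
    · rw [hslice]
      exact List.take_prefix _ _
  · rintro ⟨hne, hpre⟩
    refine ⟨(t.toList.length : Int), ⟨by positivity, ?_⟩, ?_⟩
    · have hle := hpre.length_le
      have hlt : t.toList.length < o.toList.length := by
        rcases lt_or_eq_of_le hle with h | h
        · exact h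
        · exact absurd (String.toList_inj.mp (hpre.eq_of_length h)).symm hne
      exact_mod_cast hlt
    · rw [← String.toList_inj, PySem.Str.toList_slice, PySem.Chars.slice_eq_listSlice,
        PySem.List.slice_to _ (by positivity)]
      simpa using (List.prefix_iff_eq_take.mp hpre).symm

lemma pvMem_candSuf_iff (t o : String) :
    t ∈ pvCandSuf o ↔ (t.toList <:+ o.toList ∧ ¬ t.toList <+: o.toList) := by
  unfold pvCandSuf
  simp only [List.mem_filter, List.mem_map, PySem.List.mem_pyRange_one, PySem.Str.len_eq,
    Bool.not_eq_eq_eq_not, Bool.not_true, Bool.eq_false_iff, ne_eq,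
    PySem.Str.startswith_eq, PySem.Chars.startswith_iff]
  constructor
  · rintro ⟨⟨k, ⟨hk1, hkn⟩, rfl⟩, hnp⟩
    have hslice : (PySem.Str.slice o (some k) none).toList = o.toList.drop k.toNat := by
      rw [PySem.Str.toList_slice, PySem.Chars.slice_eq_listSlice, PySem.List.slice_from _ (by omega)]
    exact ⟨by rw [hslice]; exact List.drop_suffix _ _, hnp⟩
  · rintro ⟨hsuf, hnp⟩
    have hne : t.toList ≠ o.toList := by
      rintro he; exact hnp (he ▸ List.prefix_rfl)
    have hnnil : t.toList ≠ [] := by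
      rintro he; exact hnp (he ▸ List.nil_prefix)
    have hle := hsuf.length_le
    have hlt : t.toList.length < o.toList.length := by
      rcases lt_or_eq_of_le hle with h | h
      · exact h
      · exact absurd (hsuf.eq_of_length h) hne
    have hpos : 0 < t.toList.length := List.length_pos_iff.mpr hnnil
    refine ⟨⟨((o.toList.length - t.toList.length : Nat) : Int), ⟨by omega, by omega⟩, ?_⟩, hnp⟩
    rw [← String.toList_inj, PySem.Str.toList_slice, PySem.Chars.slice_eq_listSlice,
      PySem.List.slice_from _ (by positivity)]
    simpa using (List.suffix_iff_eq_drop.mp hsuf).symm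

lemma pvMem_candMid_iff (t o : String) :
    t ∈ pvCandMid o ↔ (t.toList <:+: o.toList ∧ ¬ t.toList <+: o.toList ∧ ¬ t.toList <:+ o.toList) := by
  unfold pvCandMid
  simp only [List.mem_filter, List.mem_flatMap, List.mem_map,
    PySem.List.mem_pyRange_one, PySem.Str.len_eq, Bool.and_eq_true,
    Bool.not_eq_eq_eq_not, Bool.not_true, Bool.eq_false_iff, ne_eq,
    PySem.Str.startswith_eq, PySem.Chars.startswith_iff,
    PySem.Str.endswith_eq, PySem.Chars.endswith_iff]
  constructor
  · rintro ⟨⟨i, ⟨hi1, hin⟩, j, ⟨hj1, hjn⟩, rfl⟩, hnp, hns⟩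
    have hslice : (PySem.Str.slice o (some i) (some j)).toList
        = (o.toList.drop i.toNat).take (j.toNat - i.toNat) := by
      rw [PySem.Str.toList_slice, PySem.Chars.slice_eq_listSlice,
        PySem.List.slice_toNat _ (by omega) (by omega)]
    refine ⟨?_, hnp, hns⟩
    rw [hslice]
    exact ((List.take_prefix _ _).isInfix).trans (List.drop_suffix _ _).isInfix
  · rintro ⟨hinf, hnp, hns⟩
    obtain ⟨l1, l2, hsplit⟩ : ∃ l1 l2, o.toList = l1 ++ t.toList ++ l2 := by
      obtain ⟨l1, l2, h⟩ := hinf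
      exact ⟨l1, l2, h.symm⟩
    have hl1 : l1 ≠ [] := by
      rintro rfl; exact hnp ⟨l2, by simpa using hsplit.symm⟩
    have hl2 : l2 ≠ [] := by
      rintro rfl; exact hns ⟨l1, by simpa using hsplit.symm⟩
    have ht : t.toList ≠ [] := by
      rintro he; exact hnp (he ▸ List.nil_prefix)
    have h1 : 0 < l1.length := List.length_pos_iff.mpr hl1
    have h2 : 0 < l2.length := List.length_pos_iff.mpr hl2
    have h3 : 0 < t.toList.length := List.length_pos_iff.mpr ht
    have hlen : o.toList.length = l1.length + t.toList.length + l2.length := by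
      rw [hsplit]; simp [Nat.add_assoc]
    have hj1 : (l1.length : Int) + 1 ≤ ((l1.length + t.toList.length : Nat) : Int) := by
      push_cast; omega
    have hj2 : ((l1.length + t.toList.length : Nat) : Int) < (o.toList.length : Int) := by
      push_cast; omega
    refine ⟨⟨(l1.length : Int), ⟨by omega, by omega⟩,
            ((l1.length + t.toList.length : Nat) : Int), ⟨hj1, hj2⟩, ?_⟩, hnp, hns⟩
    rw [← String.toList_inj, PySem.Str.toList_slice, PySem.Chars.slice_eq_listSlice,
      PySem.List.slice_toNat _ (by positivity) (by positivity)]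
    simp only [Int.toNat_natCast]
    have hsub : l1.length + t.toList.length - l1.length = t.toList.length := by omega
    rw [hsub, hsplit, List.append_assoc, List.drop_left, List.take_left]

-- the three flag equalities ---------------------------------------------------------

lemma pvFlagPre (all : List String) (t : String) :
    (all.foldl (fun acc o => PySem.Set.update acc (pvCandPre o)) PySem.Set.empty).contains t
      = all.any (pvCondPre t) := by
  rw [Bool.eq_iff_iff, PySem.Set.contains_iff, pvMem_foldl_update, List.any_eq_true]
  simp only [pvMem_candPre_iff, pvCondPre_iff]
  simp [PySem.Set.empty]

lemma pvFlagSuf (all : List String) (t : String) :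
    (all.foldl (fun acc o => PySem.Set.update acc (pvCandSuf o)) PySem.Set.empty).contains t
      = all.any (pvCondSuf t) := by
  rw [Bool.eq_iff_iff, PySem.Set.contains_iff, pvMem_foldl_update, List.any_eq_true]
  simp only [pvMem_candSuf_iff, pvCondSuf_iff]
  simp [PySem.Set.empty]

lemma pvFlagMid (all : List String) (t : String) :
    (all.foldl (fun acc o => PySem.Set.update acc (pvCandMid o)) PySem.Set.empty).contains t
      = all.any (pvCondMid t) := by
  rw [Bool.eq_iff_iff, PySem.Set.contains_iff, pvMem_foldl_update, List.any_eq_true]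
  simp only [pvMem_candMid_iff, pvCondMid_iff]
  simp [PySem.Set.empty]

-- ===== VERDICT (by name: the statement is the Claim_ definition above) =====
theorem process_typo_chunk_for_index_py_spec : Claim_equal_process_typo_chunk_for_index_py := by
  intro chunk_data _hdom
  unfold Spec_process_typo_chunk_for_index_py
  unfold process_typo_chunk_for_index_py process_typo_chunk_for_index_py_alt
  obtain ⟨chunk, all⟩ := chunk_data
  simp only []
  congr 1
  apply congrArg
  apply PySem.List.foldl_congr_mem
  intro d t _ht
  congr 1
  have hinit : (PySem.Dict.ofList
      [("appears_as_prefix", false), ("appears_as_suffix", false), ("appears_in_middle", false)]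
      : PySem.Dict String Bool)
      = PySem.Dict.mk [("appears_as_prefix", false), ("appears_as_suffix", false), ("appears_in_middle", false)] := rfl
  rw [hinit, pvInnerA_foldl]
  have hB : (PySem.Dict.ofList
      [("appears_as_prefix", (all.foldl (fun acc o => PySem.Set.update acc (pvCandPre o)) PySem.Set.empty).contains t),
       ("appears_as_suffix", (all.foldl (fun acc o => PySem.Set.update acc (pvCandSuf o)) PySem.Set.empty).contains t),
       ("appears_in_middle", (all.foldl (fun acc o => PySem.Set.update acc (pvCandMid o)) PySem.Set.empty).contains t)]
      : PySem.Dict String Bool)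
      = PySem.Dict.mk
      [("appears_as_prefix", (all.foldl (fun acc o => PySem.Set.update acc (pvCandPre o)) PySem.Set.empty).contains t),
       ("appears_as_suffix", (all.foldl (fun acc o => PySem.Set.update acc (pvCandSuf o)) PySem.Set.empty).contains t),
       ("appears_in_middle", (all.foldl (fun acc o => PySem.Set.update acc (pvCandMid o)) PySem.Set.empty).contains t)] := rfl
  rw [hB, pvFlagPre, pvFlagSuf, pvFlagMid]
  simp
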